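-- pv_equiv track=rewrite | github.com/nobe0716/problem_solving | codeforces/contests/1332/C. K-Complete Word.py | solve
-- ===== SOURCE A (Python) =====
-- from collections import Counter
--
-- def solve(n, k, s):
--     cnt = 0
--
--     for i in range(k):
--         c = Counter()
--         for j in range(i, n, k):
--             c[s[j]] += 1
--         for j in range(n - i - 1, -1, -k):
--             c[s[j]] += 1
--         cnt += (sum(c.values()) - c.most_common(1)[0][1])
--
--     return cnt // 2
-- ===== SOURCE B (Python) =====
-- def solve(n, k, s):
--     # One flat pass: bucket every position into its mirror-pair group
--     # g = min(p % k, (n-1-p) % k) and tally characters per group; each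
--     # group is counted once, so no final halving is needed.
--     if k <= 0:
--         return 0
--     groups = {}
--     for p in range(n):
--         g = min(p % k, (n - 1 - p) % k)
--         cnt = groups.setdefault(g, {})
--         c = s[p]
--         cnt[c] = cnt.get(c, 0) + 1
--     return sum(sum(cnt.values()) - max(cnt.values()) for cnt in groups.values())
-- ===== Notes on version B (the rewrite author's own statement) =====
-- stated objective: alternative
-- what changed: B makes a single flat pass over the string, bucketing every position p into its mirror-pair group min(p%k,(n-1-p)%k) in a dict of per-group character tallies, then sums (group size - group max) once per group with no final halving, replacing A's k rounds of forward/backward index loops, Counter.most_common and the double-count-then-halve trick.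
import Mathlib
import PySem

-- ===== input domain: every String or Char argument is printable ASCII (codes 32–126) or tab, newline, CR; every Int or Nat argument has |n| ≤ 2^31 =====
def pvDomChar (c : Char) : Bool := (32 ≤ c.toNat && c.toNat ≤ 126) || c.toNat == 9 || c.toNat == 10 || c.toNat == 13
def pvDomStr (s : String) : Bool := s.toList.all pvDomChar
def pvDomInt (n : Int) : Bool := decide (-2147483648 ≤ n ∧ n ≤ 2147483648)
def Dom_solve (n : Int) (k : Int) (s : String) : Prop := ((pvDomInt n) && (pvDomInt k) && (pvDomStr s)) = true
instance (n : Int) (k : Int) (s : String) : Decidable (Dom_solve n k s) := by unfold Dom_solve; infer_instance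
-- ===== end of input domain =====

-- B replaces A's k rounds of forward/backward residue loops (and the double-count-then-halve
-- trick) with ONE flat pass bucketing each position into its mirror-pair group, no final halving.

-- ===== PORT A =====
-- c.most_common(1)[0][1]: most_common orders items by count descending (stable); [0][1] is the first (maximal) count
def pvMostCommonTop (c : PySem.Dict Char Int) : Int :=
  ((PySem.List.sorted c.items (fun p => p.2) true).headD ('?', 0)).2

def solve (n : Int) (k : Int) (s : String) : Int :=
  let cs := s.toList
  let cnt := (PySem.List.pyRange 0 k 1).foldl (fun cnt i =>
    let c : PySem.Dict Char Int := (PySem.List.pyRange i n k).foldl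
        (fun d j => d.modify (PySem.List.pyGetD cs j '?') 0 (· + 1)) PySem.Dict.empty
    let c := (PySem.List.pyRange (n - i - 1) (-1) (-k)).foldl
        (fun d j => d.modify (PySem.List.pyGetD cs j '?') 0 (· + 1)) c
    cnt + (c.values.sum - pvMostCommonTop c)) 0
  PySem.Int.floordiv cnt 2

-- ===== PORT B =====
def solve_alt (n : Int) (k : Int) (s : String) : Int :=
  if k ≤ 0 then 0 else
  let cs := s.toList
  let groups : PySem.Dict Int (PySem.Dict Char Int) :=
    (PySem.List.pyRange 0 n 1).foldl (fun d p =>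
      -- g = min(p % k, (n－1－p) % k); cnt = groups.setdefault(g, {}); cnt[c] = cnt.get(c, 0) + 1
      d.modify (min (PySem.Int.mod p k) (PySem.Int.mod (n - 1 - p) k)) PySem.Dict.empty
        (fun cnt => cnt.modify (PySem.List.pyGetD cs p '?') 0 (· + 1))) PySem.Dict.empty
  (groups.values.map (fun cnt =>
      cnt.values.sum - (PySem.List.max? cnt.values (fun v => v)).getD 0)).sum

-- ===== PRECONDITION & SPEC =====
-- Pre_ excludes exactly the inputs where the Python A raises: an IndexError reading s[j] when
-- n > len(s), and an IndexError on most_common(1)[0] (an empty residue class) whenever k > n.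
-- For k ≤ 0 both programs return 0, so those inputs stay inside Pre_.
def Pre_solve (n : Int) (k : Int) (s : String) : Prop :=
  k ≤ 0 ∨ (1 ≤ k ∧ k ≤ n ∧ n ≤ PySem.Str.len s)
instance (n : Int) (k : Int) (s : String) : Decidable (Pre_solve n k s) := by unfold Pre_solve; infer_instance

def pvWitness_solve : Int × Int × String := (6, 2, "abcaba")

def Spec_solve (n : Int) (k : Int) (s : String) (out : Int) : Prop := out = solve_alt n k s
instance (n : Int) (k : Int) (s : String) (out : Int) : Decidable (Spec_solve n k s out) := by unfold Spec_solve; infer_instance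

-- ===== CLAIM (what is proved, stated in full; the proofs are below) =====
def Claim_equal_solve : Prop := ∀ (n : Int) (k : Int) (s : String), Dom_solve n k s → Pre_solve n k s → Spec_solve n k s (solve n k s)

-- ===== LEMMAS AND PROOFS =====

-- abbreviations used only by the proofs
def pvChar (cs : List Char) (j : Int) : Char := PySem.List.pyGetD cs j '?'
def pvL (cs : List Char) (n k j : Int) : List Char := (PySem.List.pyRange j n k).map (pvChar cs)
def pvSig (n k i : Int) : Int := PySem.Int.mod (n - 1 - i) k
-- the statistic both programs take of a tally: total count minus the largest count
def pvFspec (l : List Char) : Int :=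
  (∑ c ∈ l.toFinset, (l.count c : Int)) - l.toFinset.fold max 0 (fun c => (l.count c : Int))

-- σ maps into [0,k), and is an involution of [0,k)
theorem pv_sig_range (n k i : Int) (hk : 0 < k) : 0 ≤ pvSig n k i ∧ pvSig n k i < k :=
  ⟨PySem.Int.mod_nonneg _ hk, PySem.Int.mod_lt _ hk⟩

theorem pv_sig_invol (n k i : Int) (hk : 0 < k) (h0 : 0 ≤ i) (h1 : i < k) :
    pvSig n k (pvSig n k i) = i := by
  unfold pvSig
  rw [PySem.Int.mod_eq_emod_of_pos hk, PySem.Int.mod_eq_emod_of_pos hk,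
    show n - 1 - (n - 1 - i) % k = (n - 1) - (n - 1 - i) % k by ring,
    Int.sub_emod (n - 1) ((n - 1 - i) % k) k, Int.emod_emod_of_dvd _ (dvd_refl k),
    ← Int.sub_emod, show n - 1 - (n - 1 - i) = i by ring]
  exact Int.emod_eq_of_lt h0 h1

-- the group key of position p is determined by its residue: key p = min r (σ r), r = p % k
theorem pv_key_eq (n k p : Int) (hk : 0 < k) :
    min (PySem.Int.mod p k) (PySem.Int.mod (n - 1 - p) k)
      = min (PySem.Int.mod p k) (pvSig n k (PySem.Int.mod p k)) := by
  unfold pvSig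
  congr 1
  rw [PySem.Int.mod_eq_emod_of_pos hk, PySem.Int.mod_eq_emod_of_pos hk,
    PySem.Int.mod_eq_emod_of_pos hk,
    show n - 1 - p % k = (n - 1) - p % k by ring,
    Int.sub_emod (n - 1) (p % k) k, Int.emod_emod_of_dvd _ (dvd_refl k),
    ← Int.sub_emod, show n - 1 - p = n - 1 - p by ring]

-- membership in a stepped range is a residue condition
theorem pv_mem_range_residue (n k g p : Int) (hk : 0 < k) (hg0 : 0 ≤ g) (hgk : g < k) :
    p ∈ PySem.List.pyRange g n k ↔ 0 ≤ p ∧ p < n ∧ p % k = g := by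
  rw [PySem.List.mem_pyRange_iff_of_pos hk]
  constructor
  · rintro ⟨h1, h2, c, hc⟩
    refine ⟨by omega, h2, ?_⟩
    rw [show p = g + k * c by omega, Int.add_mul_emod_self_left]
    exact Int.emod_eq_of_lt hg0 hgk
  · rintro ⟨h1, h2, h3⟩
    have hdiv : p % k = p - k * (p / k) := by rw [Int.emod_def]
    have hq : 0 ≤ p / k := Int.ediv_nonneg h1 (le_of_lt hk)
    have hkq : 0 ≤ k * (p / k) := mul_nonneg (le_of_lt hk) hq
    exact ⟨by omega, h2, ⟨p / k, by omega⟩⟩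

theorem pv_nodup_pyRange_pos (a b k : Int) (hk : 0 < k) : (PySem.List.pyRange a b k).Nodup := by
  rw [PySem.List.pyRange_of_pos a b hk]
  refine List.Nodup.map ?_ (List.nodup_range)
  intro x y h
  have hk0 : k ≠ 0 := by omega
  have h2 : k * (x : Int) = k * (y : Int) := add_left_cancel h
  exact_mod_cast mul_left_cancel₀ hk0 h2

-- pvFspec depends only on the character counts
theorem pvFspec_congr {l l' : List Char} (h : ∀ c, l.count c = l'.count c) :
    pvFspec l = pvFspec l' := by
  have ht : l.toFinset = l'.toFinset := by
    ext c
    simp only [List.mem_toFinset, ← List.count_pos_iff, h]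
  unfold pvFspec
  rw [ht, Finset.sum_congr rfl (fun c _ => by rw [h]),
    Finset.fold_congr (fun c _ => by rw [h c])]

theorem pvFspec_double (l : List Char) : pvFspec (l ++ l) = 2 * pvFspec l := by
  unfold pvFspec
  have ht : (l ++ l).toFinset = l.toFinset := by
    rw [List.toFinset_append, Finset.union_self]
  have hc : ∀ c ∈ l.toFinset, ((l ++ l).count c : Int) = 2 * (l.count c : Int) := by
    intro c _
    rw [List.count_append]
    push_cast
    ring
  rw [ht, Finset.sum_congr rfl hc, Finset.fold_congr hc, ← Finset.mul_sum]
  have hfold : l.toFinset.fold max 0 (fun c => 2 * (l.count c : Int))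
      = 2 * l.toFinset.fold max 0 (fun c => (l.count c : Int)) := by
    have := Finset.fold_hom (op := max) (op' := max) (m := fun x : Int => 2 * x)
      (b := 0) (f := fun c => (l.count c : Int)) (s := l.toFinset)
      (fun x y => by
        show 2 * max x y = max (2 * x) (2 * y)
        rcases le_total x y with h | h
        · rw [max_eq_right h, max_eq_right (by omega : 2 * x ≤ 2 * y)]
        · rw [max_eq_left h, max_eq_left (by omega : 2 * y ≤ 2 * x)])
    simpa using this
  rw [hfold]
  ring

theorem pv_values_counter (l : List Char) :
    (PySem.Dict.counter l).values = (PySem.Set.ofList l).map (fun c => (l.count c : Int)) := by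
  simp only [PySem.Dict.values, PySem.Dict.items_counter, List.map_map]
  rfl

theorem pv_toFinset_ofList (l : List Char) : (PySem.Set.ofList l).toFinset = l.toFinset := by
  ext c
  simp [PySem.Set.mem_ofList]

theorem pv_sum_values (l : List Char) :
    (PySem.Dict.counter l).values.sum = ∑ c ∈ l.toFinset, (l.count c : Int) := by
  rw [pv_values_counter, ← List.sum_toFinset _ (PySem.Set.nodup_ofList l), pv_toFinset_ofList]

-- the extremal count of a nonempty tally is the fold-max of the counts
theorem pv_max_values (l : List Char) (m : Int)
    (hmem : m ∈ (PySem.Dict.counter l).values)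
    (hub : ∀ v ∈ (PySem.Dict.counter l).values, v ≤ m) :
    m = l.toFinset.fold max 0 (fun c => (l.count c : Int)) := by
  rw [pv_values_counter] at hmem hub
  obtain ⟨c0, hc0, rfl⟩ := List.mem_map.mp hmem
  have hc0l : c0 ∈ l := (PySem.Set.mem_ofList l c0).mp hc0
  have hpos : 0 < l.count c0 := List.count_pos_iff.mpr hc0l
  refine le_antisymm ?_ ?_
  · rw [Finset.le_fold_max]
    exact Or.inr ⟨c0, List.mem_toFinset.mpr hc0l, le_refl _⟩
  · rw [Finset.fold_max_le]
    refine ⟨by exact_mod_cast Nat.zero_le _, ?_⟩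
    intro x hx
    exact hub _ (List.mem_map_of_mem ((PySem.Set.mem_ofList l x).mpr (List.mem_toFinset.mp hx)))

-- A's per-round statistic equals pvFspec
theorem pv_mct_eq (l : List Char) (hne : l ≠ []) :
    (PySem.Dict.counter l).values.sum - pvMostCommonTop (PySem.Dict.counter l) = pvFspec l := by
  have hitemsne : (PySem.Dict.counter l).items ≠ [] := by
    rw [PySem.Dict.items_counter]
    obtain ⟨x, hx⟩ := List.exists_mem_of_ne_nil l hne
    exact List.ne_nil_of_mem (List.mem_map_of_mem ((PySem.Set.mem_ofList l x).mpr hx))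
  have hsne : PySem.List.sorted (PySem.Dict.counter l).items (fun p => p.2) true ≠ [] := by
    intro h
    exact hitemsne ((PySem.List.sorted_eq_nil_iff _ _ _).mp h)
  obtain ⟨m, t, hmt⟩ := List.exists_cons_of_ne_nil hsne
  have hmA : pvMostCommonTop (PySem.Dict.counter l) = m.2 := by
    rw [pvMostCommonTop, hmt]
    rfl
  have hm_mem : m.2 ∈ (PySem.Dict.counter l).values := by
    have hm : m ∈ (PySem.Dict.counter l).items :=
      (PySem.List.sorted_perm _ _ _).mem_iff.mp (hmt ▸ List.mem_cons_self)
    simpa only [PySem.Dict.values] using List.mem_map_of_mem (f := fun p => p.2) hm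
  have hm_ub : ∀ v ∈ (PySem.Dict.counter l).values, v ≤ m.2 := by
    intro v hv
    simp only [PySem.Dict.values, List.mem_map] at hv
    obtain ⟨p, hp, rfl⟩ := hv
    exact PySem.List.key_head_sorted_rev_ge _ _ hmt p hp
  rw [hmA, pv_max_values l m.2 hm_mem hm_ub, pv_sum_values]
  rfl

-- B's per-group statistic equals pvFspec
theorem pv_stat_eq (l : List Char) (hne : l ≠ []) :
    (PySem.Dict.counter l).values.sum
      - (PySem.List.max? (PySem.Dict.counter l).values (fun v => v)).getD 0 = pvFspec l := by
  have hvne : (PySem.Dict.counter l).values ≠ [] := by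
    rw [pv_values_counter]
    obtain ⟨x, hx⟩ := List.exists_mem_of_ne_nil l hne
    exact List.ne_nil_of_mem (List.mem_map_of_mem ((PySem.Set.mem_ofList l x).mpr hx))
  obtain ⟨m, hm⟩ : ∃ m, PySem.List.max? (PySem.Dict.counter l).values (fun v => v) = some m := by
    cases h : PySem.List.max? (PySem.Dict.counter l).values (fun v => v) with
    | none => exact absurd ((PySem.List.max?_eq_none_iff _ _).mp h) hvne
    | some m => exact ⟨m, rfl⟩
  rw [hm, Option.getD_some,
    pv_max_values l m (PySem.List.max?_mem hm) (PySem.List.max?_isMax hm), pv_sum_values]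
  rfl

-- the grouping fold, read at one key, is the tally fold over that key's positions
theorem pv_groups_getD (cs : List Char) (n k : Int) (ps : List Int)
    (d : PySem.Dict Int (PySem.Dict Char Int)) (g : Int) :
    (ps.foldl (fun d p =>
        d.modify (min (PySem.Int.mod p k) (PySem.Int.mod (n - 1 - p) k)) PySem.Dict.empty
          (fun cnt => cnt.modify (PySem.List.pyGetD cs p '?') 0 (· + 1))) d).getD g PySem.Dict.empty
      = (ps.filter (fun p =>
            min (PySem.Int.mod p k) (PySem.Int.mod (n - 1 - p) k) == g)).foldl
          (fun cnt p => cnt.modify (PySem.List.pyGetD cs p '?') 0 (· + 1)) (d.getD g PySem.Dict.empty) := by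
  induction ps generalizing d with
  | nil => rfl
  | cons p ps ih =>
    rw [List.foldl_cons, ih, List.filter_cons]
    by_cases h : min (PySem.Int.mod p k) (PySem.Int.mod (n - 1 - p) k) = g
    · simp only [h, beq_self_eq_true, if_pos, List.foldl_cons,
        PySem.Dict.getD_modify]
    · have hb : (min (PySem.Int.mod p k) (PySem.Int.mod (n - 1 - p) k) == g) = false :=
        beq_false_of_ne h
      rw [hb]
      simp only [Bool.false_eq_true, if_false, PySem.Dict.getD_modify,
        if_neg (Ne.symm h)]

-- the backward scan range(a, -1, -k) visits residue class a % k below n, in reverse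
theorem pv_bwd_reverse (a n k : Int) (hk : 0 < k) (h0 : 0 ≤ a) (h1 : a < n) (h2 : n ≤ a + k) :
    (PySem.List.pyRange a (-1) (-k)).reverse = PySem.List.pyRange (PySem.Int.mod a k) n k := by
  have hk0 : k ≠ 0 := by omega
  have hmod : PySem.Int.mod a k = a % k := PySem.Int.mod_eq_emod_of_pos hk
  set q := a / k with hq
  set j := a % k with hjd
  have hdiv : k * q + j = a := Int.mul_ediv_add_emod a k
  have hj0 : 0 ≤ j := Int.emod_nonneg a hk0
  have hjk : j < k := Int.emod_lt_of_pos a hk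
  have hq0 : 0 ≤ q := Int.ediv_nonneg h0 (le_of_lt hk)
  have hkq : 0 ≤ k * q := mul_nonneg (le_of_lt hk) hq0
  have hcL : (a - -1 + - -k - 1) / - -k = q + 1 := by
    rw [neg_neg, show a - -1 + k - 1 = a + 1 * k by ring, Int.add_mul_ediv_right a 1 hk0]
  have hcR : (n - j + k - 1) / k = q + 1 := by
    rw [show n - j + k - 1 = (n - 1 - a) + (q + 1) * k by rw [← hdiv]; ring,
      Int.add_mul_ediv_right _ _ hk0, Int.ediv_eq_zero_of_lt (by omega) (by omega)]
    omega
  rw [hmod]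
  simp only [PySem.List.pyRange,
    if_neg (show ¬ -k = 0 by omega), if_neg (show ¬ (0:Int) < -k by omega),
    if_pos (show (-1:Int) < a by omega), if_neg hk0, if_pos hk,
    if_pos (show j < n by omega), hcL, hcR]
  apply List.ext_getElem
  · simp
  · intro t ht1 ht2
    have htq : t < (q + 1).toNat := by
      simpa [List.length_map, List.length_range] using ht2
    simp only [List.getElem_reverse, List.getElem_map, List.getElem_range,
      List.length_map, List.length_range]
    have hcast : ((((q + 1).toNat - 1 - t : Nat)) : Int) = q - t := by omega
    rw [hcast]
    linear_combination (-1 : Int) * hdiv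

-- A's round-i tally is the counter of the class-i and class-σ(i) characters
theorem pv_termA (cs : List Char) (n k i : Int) (hk : 0 < k) (hkn : k ≤ n)
    (hi0 : 0 ≤ i) (hik : i < k) :
    ((PySem.List.pyRange (n - i - 1) (-1) (-k)).foldl
        (fun d j => d.modify (PySem.List.pyGetD cs j '?') 0 (· + 1))
        ((PySem.List.pyRange i n k).foldl
          (fun d j => d.modify (PySem.List.pyGetD cs j '?') 0 (· + 1)) PySem.Dict.empty)).values.sum
      - pvMostCommonTop
        ((PySem.List.pyRange (n - i - 1) (-1) (-k)).foldl
          (fun d j => d.modify (PySem.List.pyGetD cs j '?') 0 (· + 1))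
          ((PySem.List.pyRange i n k).foldl
            (fun d j => d.modify (PySem.List.pyGetD cs j '?') 0 (· + 1)) PySem.Dict.empty))
      = pvFspec (pvL cs n k i ++ pvL cs n k (pvSig n k i)) := by
  have hin : i < n := lt_of_lt_of_le hik hkn
  set fwd := PySem.List.pyRange i n k with hfwd
  set bwd := PySem.List.pyRange (n - i - 1) (-1) (-k) with hbwd
  have hA : (bwd.foldl (fun d j => d.modify (PySem.List.pyGetD cs j '?') 0 (· + 1))
              (fwd.foldl (fun d j => d.modify (PySem.List.pyGetD cs j '?') 0 (· + 1))
                PySem.Dict.empty))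
          = PySem.Dict.counter ((fwd ++ bwd).map (pvChar cs)) := by
    rw [PySem.Dict.counter_eq_foldl, List.foldl_map, List.foldl_append]
    rfl
  have hrev : bwd.reverse = PySem.List.pyRange (pvSig n k i) n k := by
    rw [hbwd, show n - i - 1 = n - 1 - i by ring]
    exact pv_bwd_reverse (n - 1 - i) n k hk (by omega) (by omega) (by omega)
  have him : i ∈ fwd ++ bwd := by
    rw [List.mem_append, hfwd]
    exact Or.inl ((PySem.List.mem_pyRange_iff_of_pos hk i).mpr ⟨le_refl i, hin, by simp⟩)
  have hne : (fwd ++ bwd).map (pvChar cs) ≠ [] :=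
    List.ne_nil_of_mem (List.mem_map_of_mem him)
  rw [hA, pv_mct_eq _ hne]
  apply pvFspec_congr
  intro c
  have hb : (bwd.map (pvChar cs)).count c = (pvL cs n k (pvSig n k i)).count c := by
    rw [← List.count_reverse (l := bwd.map (pvChar cs)), ← List.map_reverse, hrev]
    rfl
  rw [List.map_append, List.count_append, List.count_append, hb]
  rfl

-- which residues share a group key
theorem pv_min_eq (n k g i : Int) (hk : 0 < k) (hg0 : 0 ≤ g) (hgk : g < k)
    (hgs : g ≤ pvSig n k g) (hi0 : 0 ≤ i) (hik : i < k) :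
    min i (pvSig n k i) = g ↔ i = g ∨ i = pvSig n k g := by
  constructor
  · intro h
    rcases min_cases i (pvSig n k i) with ⟨he, _⟩ | ⟨he, _⟩
    · exact Or.inl (by omega)
    · right
      have hsg2 : pvSig n k i = g := by omega
      rw [← hsg2, pv_sig_invol n k i hk hi0 hik]
  · rintro (rfl | rfl)
    · exact min_eq_left hgs
    · rw [pv_sig_invol n k g hk hg0 hgk]
      exact min_eq_right hgs

-- the positions of group g are the residue classes g and σ(g)
theorem pv_group_perm (n k g : Int) (hk : 0 < k) (hg0 : 0 ≤ g) (hgk : g < k)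
    (hgs : g ≤ pvSig n k g) :
    ((PySem.List.pyRange 0 n 1).filter (fun p =>
        min (PySem.Int.mod p k) (PySem.Int.mod (n - 1 - p) k) == g)).Perm
      (if g = pvSig n k g then PySem.List.pyRange g n k
       else PySem.List.pyRange g n k ++ PySem.List.pyRange (pvSig n k g) n k) := by
  have hs0 := pv_sig_range n k g hk
  have hmem : ∀ p, (p ∈ (PySem.List.pyRange 0 n 1).filter (fun p =>
      min (PySem.Int.mod p k) (PySem.Int.mod (n - 1 - p) k) == g)) ↔
      (0 ≤ p ∧ p < n ∧ (p % k = g ∨ p % k = pvSig n k g)) := by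
    intro p
    rw [List.mem_filter, PySem.List.mem_pyRange_one, beq_iff_eq, pv_key_eq n k p hk]
    have hr0 : 0 ≤ PySem.Int.mod p k := PySem.Int.mod_nonneg p hk
    have hrk : PySem.Int.mod p k < k := PySem.Int.mod_lt p hk
    rw [pv_min_eq n k g _ hk hg0 hgk hgs hr0 hrk,
      PySem.Int.mod_eq_emod_of_pos hk]
    tauto
  by_cases hfix : g = pvSig n k g
  · rw [if_pos hfix]
    refine List.perm_of_nodup_nodup_toFinset_eq
      ((PySem.List.nodup_pyRange_one 0 n).filter _) (pv_nodup_pyRange_pos g n k hk) ?_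
    ext p
    simp only [List.mem_toFinset]
    rw [hmem p, pv_mem_range_residue n k g p hk hg0 hgk, ← hfix]
    tauto
  · rw [if_neg hfix]
    have hdisj : (PySem.List.pyRange g n k).Disjoint (PySem.List.pyRange (pvSig n k g) n k) := by
      intro p hp1 hp2
      rw [pv_mem_range_residue n k g p hk hg0 hgk] at hp1
      rw [pv_mem_range_residue n k (pvSig n k g) p hk hs0.1 hs0.2] at hp2
      omega
    refine List.perm_of_nodup_nodup_toFinset_eq
      ((PySem.List.nodup_pyRange_one 0 n).filter _)
      (List.Nodup.append (pv_nodup_pyRange_pos g n k hk)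
        (pv_nodup_pyRange_pos (pvSig n k g) n k hk) hdisj) ?_
    ext p
    simp only [List.mem_toFinset, List.mem_append]
    rw [hmem p, pv_mem_range_residue n k g p hk hg0 hgk,
      pv_mem_range_residue n k (pvSig n k g) p hk hs0.1 hs0.2]
    tauto


-- the heart of the equivalence: A's doubled sum over residues is twice B's sum over groups
theorem pv_main (n k : Int) (s : String) (hk1 : 1 ≤ k) (hkn : k ≤ n)
    (_hnl : n ≤ (s.toList.length : Int)) : solve n k s = solve_alt n k s := by
  have hk : 0 < k := hk1
  set cs := s.toList with hcs
  have hmodid : ∀ i : Int, 0 ≤ i → i < k → PySem.Int.mod i k = i := by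
    intro i h0 h1
    rw [PySem.Int.mod_eq_emod_of_pos hk]
    exact Int.emod_eq_of_lt h0 h1
  have hgfacts : ∀ g i : Int, 0 ≤ i → i < k → min i (pvSig n k i) = g →
      0 ≤ g ∧ g < k ∧ g ≤ pvSig n k g := by
    intro g i h0 h1 he
    have hs := pv_sig_range n k i hk
    rcases min_cases i (pvSig n k i) with ⟨hmin, hle⟩ | ⟨hmin, hlt⟩
    · have hgi : g = i := by omega
      subst hgi
      exact ⟨h0, h1, by omega⟩
    · have hgi : g = pvSig n k i := by omega
      have h2 : pvSig n k (pvSig n k i) = i := pv_sig_invol n k i hk h0 h1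
      subst hgi
      rw [h2]
      exact ⟨hs.1, hs.2, le_of_lt hlt⟩
  -- ---------- A's value ----------
  have hA : solve n k s = PySem.Int.floordiv
      (((PySem.List.pyRange 0 k 1).map (fun i =>
        pvFspec (pvL cs n k i ++ pvL cs n k (pvSig n k i)))).sum) 2 := by
    simp only [solve, ← hcs]
    refine congrArg (fun z => PySem.Int.floordiv z 2) ?_
    rw [← zero_add (((PySem.List.pyRange 0 k 1).map (fun i =>
          pvFspec (pvL cs n k i ++ pvL cs n k (pvSig n k i)))).sum),
      ← PySem.List.foldl_add _ (fun i =>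
          pvFspec (pvL cs n k i ++ pvL cs n k (pvSig n k i))) 0]
    apply PySem.List.foldl_congr_mem
    intro acc i hi
    rw [PySem.List.mem_pyRange_one] at hi
    rw [pv_termA cs n k i hk hkn hi.1 hi.2]
  -- ---------- B's value ----------
  have hkeys : ((PySem.List.pyRange 0 n 1).foldl (fun d p =>
        d.modify (min (PySem.Int.mod p k) (PySem.Int.mod (n - 1 - p) k)) PySem.Dict.empty
          (fun cnt => cnt.modify (PySem.List.pyGetD cs p '?') 0 (· + 1)))
        (PySem.Dict.empty : PySem.Dict Int (PySem.Dict Char Int))).keys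
      = PySem.Set.ofList ((PySem.List.pyRange 0 n 1).map
          (fun p => min (PySem.Int.mod p k) (PySem.Int.mod (n - 1 - p) k))) := by
    rw [PySem.Dict.keys_foldl_modify_key _
      (fun p => min (PySem.Int.mod p k) (PySem.Int.mod (n - 1 - p) k))
      (PySem.Dict.empty : PySem.Dict Char Int)
      (fun _ p => fun cnt => cnt.modify (PySem.List.pyGetD cs p '?') 0 (· + 1))
      (PySem.Dict.empty : PySem.Dict Int (PySem.Dict Char Int))]
    rfl
  have hchars : ∀ g : Int, ((PySem.List.pyRange 0 n 1).foldl (fun d p =>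
        d.modify (min (PySem.Int.mod p k) (PySem.Int.mod (n - 1 - p) k)) PySem.Dict.empty
          (fun cnt => cnt.modify (PySem.List.pyGetD cs p '?') 0 (· + 1)))
        (PySem.Dict.empty : PySem.Dict Int (PySem.Dict Char Int))).getD g PySem.Dict.empty
      = PySem.Dict.counter (((PySem.List.pyRange 0 n 1).filter (fun p =>
          min (PySem.Int.mod p k) (PySem.Int.mod (n - 1 - p) k) == g)).map (pvChar cs)) := by
    intro g
    rw [pv_groups_getD cs n k _ PySem.Dict.empty g, PySem.Dict.getD_empty,
      PySem.Dict.counter_eq_foldl, List.foldl_map]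
    rfl
  have hB : solve_alt n k s = ((PySem.Set.ofList ((PySem.List.pyRange 0 n 1).map
        (fun p => min (PySem.Int.mod p k) (PySem.Int.mod (n - 1 - p) k)))).map
      (fun g => pvFspec (if g = pvSig n k g then pvL cs n k g
                         else pvL cs n k g ++ pvL cs n k (pvSig n k g)))).sum := by
    simp only [solve_alt, if_neg (show ¬ k ≤ 0 by omega), ← hcs]
    rw [PySem.Dict.values_eq_map_keys _
        (by rw [hkeys]; exact PySem.Set.nodup_ofList _) PySem.Dict.empty,
      hkeys, List.map_map]
    congr 1
    apply List.map_congr_left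
    intro g hg
    obtain ⟨p, hp, hpg⟩ := List.mem_map.mp ((PySem.Set.mem_ofList _ g).mp hg)
    have hr0 : 0 ≤ PySem.Int.mod p k := PySem.Int.mod_nonneg p hk
    have hrk : PySem.Int.mod p k < k := PySem.Int.mod_lt p hk
    obtain ⟨hg0, hgk, hgs⟩ := hgfacts g (PySem.Int.mod p k) hr0 hrk
      (by rw [← pv_key_eq n k p hk]; exact hpg)
    have hgkey : min (PySem.Int.mod g k) (PySem.Int.mod (n - 1 - g) k) = g := by
      rw [pv_key_eq n k g hk, hmodid g hg0 hgk]
      exact min_eq_left hgs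
    have hgm : g ∈ (PySem.List.pyRange 0 n 1).filter (fun p =>
        min (PySem.Int.mod p k) (PySem.Int.mod (n - 1 - p) k) == g) := by
      rw [List.mem_filter, PySem.List.mem_pyRange_one, hgkey]
      exact ⟨⟨hg0, by omega⟩, beq_self_eq_true g⟩
    have hne : ((PySem.List.pyRange 0 n 1).filter (fun p =>
        min (PySem.Int.mod p k) (PySem.Int.mod (n - 1 - p) k) == g)).map (pvChar cs) ≠ [] :=
      List.ne_nil_of_mem (List.mem_map_of_mem hgm)
    simp only [Function.comp]
    rw [hchars g, pv_stat_eq _ hne]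
    apply pvFspec_congr
    intro c
    have hperm := (pv_group_perm n k g hk hg0 hgk hgs).map (pvChar cs)
    rw [hperm.count_eq]
    by_cases hfix : g = pvSig n k g
    · rw [if_pos hfix, if_pos hfix]
      rfl
    · rw [if_neg hfix, if_neg hfix, List.map_append]
      rfl
  -- ---------- the pairing ----------
  have hKfin : (PySem.Set.ofList ((PySem.List.pyRange 0 n 1).map
        (fun p => min (PySem.Int.mod p k) (PySem.Int.mod (n - 1 - p) k)))).toFinset
      = ((PySem.List.pyRange 0 k 1).toFinset).image (fun i => min i (pvSig n k i)) := by
    ext g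
    simp only [List.mem_toFinset, Finset.mem_image]
    rw [PySem.Set.mem_ofList]
    constructor
    · intro hg
      obtain ⟨p, _, hpg⟩ := List.mem_map.mp hg
      refine ⟨PySem.Int.mod p k, ?_, ?_⟩
      · rw [PySem.List.mem_pyRange_one]
        exact ⟨PySem.Int.mod_nonneg p hk, PySem.Int.mod_lt p hk⟩
      · rw [← pv_key_eq n k p hk]
        exact hpg
    · rintro ⟨i, hi, rfl⟩
      rw [PySem.List.mem_pyRange_one] at hi
      refine List.mem_map.mpr ⟨i, ?_, ?_⟩
      · rw [PySem.List.mem_pyRange_one]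
        omega
      · rw [pv_key_eq n k i hk, hmodid i hi.1 hi.2]
  have hinner : ∀ g ∈ ((PySem.List.pyRange 0 k 1).toFinset).image
      (fun i => min i (pvSig n k i)),
      (∑ i ∈ (PySem.List.pyRange 0 k 1).toFinset with min i (pvSig n k i) = g,
        pvFspec (pvL cs n k i ++ pvL cs n k (pvSig n k i)))
      = 2 * pvFspec (if g = pvSig n k g then pvL cs n k g
                     else pvL cs n k g ++ pvL cs n k (pvSig n k g)) := by
    intro g hg
    obtain ⟨i0, hi0m, hi0g⟩ := Finset.mem_image.mp hg
    rw [List.mem_toFinset, PySem.List.mem_pyRange_one] at hi0m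
    obtain ⟨hg0, hgk, hgs⟩ := hgfacts g i0 hi0m.1 hi0m.2 hi0g
    have hsg := pv_sig_range n k g hk
    have hmm : ∀ i : Int, ((0 ≤ i ∧ i < k) ∧ min i (pvSig n k i) = g)
        ↔ (i = g ∨ i = pvSig n k g) := by
      intro i
      constructor
      · rintro ⟨⟨h0, h1⟩, he⟩
        exact (pv_min_eq n k g i hk hg0 hgk hgs h0 h1).mp he
      · intro h
        have hik : 0 ≤ i ∧ i < k := by
          rcases h with rfl | rfl
          · exact ⟨hg0, hgk⟩
          · exact hsg
        exact ⟨hik, (pv_min_eq n k g i hk hg0 hgk hgs hik.1 hik.2).mpr h⟩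
    by_cases hfix : g = pvSig n k g
    · have hfilt : ((PySem.List.pyRange 0 k 1).toFinset.filter
          (fun i => min i (pvSig n k i) = g)) = {g} := by
        ext i
        rw [Finset.mem_filter, Finset.mem_singleton, List.mem_toFinset,
          PySem.List.mem_pyRange_one]
        rw [hmm i]
        constructor
        · rintro (rfl | he)
          · rfl
          · omega
        · rintro rfl
          exact Or.inl rfl
      rw [hfilt, Finset.sum_singleton, if_pos hfix, ← hfix]
      exact pvFspec_double _
    · have hfilt : ((PySem.List.pyRange 0 k 1).toFinset.filter
          (fun i => min i (pvSig n k i) = g)) = {g, pvSig n k g} := by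
        ext i
        rw [Finset.mem_filter, Finset.mem_insert, Finset.mem_singleton, List.mem_toFinset,
          PySem.List.mem_pyRange_one]
        exact hmm i
      rw [hfilt, Finset.sum_pair hfix, if_neg hfix]
      have h2 : pvFspec (pvL cs n k (pvSig n k g) ++ pvL cs n k (pvSig n k (pvSig n k g)))
          = pvFspec (pvL cs n k g ++ pvL cs n k (pvSig n k g)) := by
        rw [pv_sig_invol n k g hk hg0 hgk]
        apply pvFspec_congr
        intro c
        rw [List.count_append, List.count_append]
        omega
      rw [h2]
      ring
  -- ---------- put it together ----------
  rw [hA, hB,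
    ← List.sum_toFinset (fun i => pvFspec (pvL cs n k i ++ pvL cs n k (pvSig n k i)))
      (PySem.List.nodup_pyRange_one 0 k),
    ← List.sum_toFinset (fun g => pvFspec (if g = pvSig n k g then pvL cs n k g
        else pvL cs n k g ++ pvL cs n k (pvSig n k g))) (PySem.Set.nodup_ofList _),
    hKfin,
    ← Finset.sum_fiberwise_of_maps_to
      (t := ((PySem.List.pyRange 0 k 1).toFinset).image (fun i => min i (pvSig n k i)))
      (g := fun i => min i (pvSig n k i))
      (fun i hi => Finset.mem_image_of_mem _ hi)
      (fun i => pvFspec (pvL cs n k i ++ pvL cs n k (pvSig n k i))),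
    Finset.sum_congr rfl hinner, ← Finset.mul_sum,
    PySem.Int.floordiv_eq_ediv_of_pos (by omega : (0:Int) < 2),
    Int.mul_ediv_cancel_left _ (by omega : (2:Int) ≠ 0)]

-- ===== VERDICT (by name: the statement is the Claim_ definition above) =====
theorem solve_spec : Claim_equal_solve := by
  unfold Claim_equal_solve
  intro n k s _ hpre
  show solve n k s = solve_alt n k s
  rcases hpre with hk | ⟨hk, hkn, hnl⟩
  · simp only [solve, solve_alt, if_pos hk]
    rw [PySem.List.pyRange_one_eq_nil hk]
    rfl
  · exact pv_main n k s hk hkn (by rwa [PySem.Str.len_eq] at hnl)
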